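-- pv_equiv track=rewrite | github.com/wangzizhe/GateForge | scripts/build_type2_mutations_v0_19_4.py | _inject_mutations
-- ===== SOURCE A (Python) =====
-- def _l2_assert(candidate_id: str) -> str:
--     return f'  assert(false, "type2_l2_sim_fail_{candidate_id}");'
--
-- def _l1_var(candidate_id: str) -> str:
--     suffix = candidate_id.replace("type2_2turn_", "").replace("_", "")
--     return f"gateforge_undef_{suffix}_v4"
--
-- def _l1_assert(candidate_id: str) -> str:
--     l1_var = _l1_var(candidate_id)
--     return f'  assert({l1_var} > 0.0, "type2_l1_undef_check_{candidate_id}");'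
--
-- def _inject_mutations(source_text: str, candidate_id: str) -> str:
--     """Inject Layer 1 and Layer 2 assertions into the equation section."""
--     l1_line = _l1_assert(candidate_id)
--     l2_line = _l2_assert(candidate_id)
--     # Find "equation" keyword and insert the two assert lines right after it
--     lines = source_text.splitlines()
--     new_lines = []
--     injected = False
--     for line in lines:
--         new_lines.append(line)
--         if not injected and line.strip() == "equation":
--             new_lines.append(l1_line)
--             new_lines.append(l2_line)
--             injected = True
--     if not injected:
--         raise ValueError("Could not find 'equation' keyword in source model")
--     return "\n".join(new_lines) + "\n"
-- ===== SOURCE B (Python) =====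
-- def _inject_mutations(source_text: str, candidate_id: str) -> str:
--     """Inject Layer 1 and Layer 2 assertions into the equation section."""
--     lines = source_text.splitlines()
--     for i, line in enumerate(lines):
--         if line.strip() == "equation":
--             break
--     else:
--         raise ValueError("Could not find 'equation' keyword in source model")
--     suffix = candidate_id.replace("type2_2turn_", "").replace("_", "")
--     l1_line = f'  assert(gateforge_undef_{suffix}_v4 > 0.0, "type2_l1_undef_check_{candidate_id}");'
--     l2_line = f'  assert(false, "type2_l2_sim_fail_{candidate_id}");'
--     return "\n".join(lines[:i + 1] + [l1_line, l2_line] + lines[i + 1:]) + "\n"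
-- ===== Notes on version B (the rewrite author's own statement) =====
-- stated objective: simpler
-- what changed: Replaces A's build-while-scanning loop with an 'injected' flag by a locate-then-splice decomposition: find the index of the first stripped 'equation' line, then splice the two assert lines in with list slicing.
import Mathlib
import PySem

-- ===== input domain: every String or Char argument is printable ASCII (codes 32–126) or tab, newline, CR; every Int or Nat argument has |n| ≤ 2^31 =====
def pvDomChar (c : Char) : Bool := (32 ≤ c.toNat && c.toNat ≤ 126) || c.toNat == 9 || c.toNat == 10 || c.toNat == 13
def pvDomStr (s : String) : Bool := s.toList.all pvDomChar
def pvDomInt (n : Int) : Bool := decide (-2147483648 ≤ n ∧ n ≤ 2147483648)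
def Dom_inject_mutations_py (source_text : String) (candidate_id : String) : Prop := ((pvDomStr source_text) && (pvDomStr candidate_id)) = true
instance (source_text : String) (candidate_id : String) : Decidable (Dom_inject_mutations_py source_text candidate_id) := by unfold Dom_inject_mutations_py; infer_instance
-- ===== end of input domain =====

-- B replaces A's build-while-scanning loop (with an 'injected' flag) by a locate-then-splice
-- decomposition: find the first stripped "equation" line, then splice the two assert lines in.


-- ===== PORT A =====
def pyA_l2_assert (candidate_id : String) : String :=
  "  assert(false, \"type2_l2_sim_fail_" ++ candidate_id ++ "\");"

def pyA_l1_var (candidate_id : String) : String :=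
  let suffix := PySem.Str.replace (PySem.Str.replace candidate_id "type2_2turn_" "") "_" ""
  "gateforge_undef_" ++ suffix ++ "_v4"

def pyA_l1_assert (candidate_id : String) : String :=
  let l1_var := pyA_l1_var candidate_id
  "  assert(" ++ l1_var ++ " > 0.0, \"type2_l1_undef_check_" ++ candidate_id ++ "\");"

def inject_mutations_py (source_text : String) (candidate_id : String) : String :=
  let l1_line := pyA_l1_assert candidate_id
  let l2_line := pyA_l2_assert candidate_id
  let lines := PySem.Str.splitlines source_text
  -- the for-loop over `lines` maintaining (new_lines, injected)
  let r := lines.foldl (fun (acc : List String × Bool) line =>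
    let nl := acc.1 ++ [line]
    if !acc.2 && (PySem.Str.strip line == "equation") then (nl ++ [l1_line, l2_line], true)
    else (nl, acc.2)) ([], false)
  -- `if not injected: raise ValueError(...)` — that input is excluded by Pre_
  if r.2 then PySem.Str.join "\n" r.1 ++ "\n" else ""

-- ===== PORT B =====
-- B's `for i, line in enumerate(lines): if line.strip() == "equation": break / else: raise`
def pyB_locate : List String → Nat → Option Nat
  | [], _ => none
  | l :: ls, i => if PySem.Str.strip l == "equation" then some i else pyB_locate ls (i + 1)

def inject_mutations_py_alt (source_text : String) (candidate_id : String) : String :=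
  let lines := PySem.Str.splitlines source_text
  match pyB_locate lines 0 with
  | none => ""  -- raise ValueError — excluded by Pre_
  | some i =>
    let suffix := PySem.Str.replace (PySem.Str.replace candidate_id "type2_2turn_" "") "_" ""
    let l1_line := "  assert(gateforge_undef_" ++ suffix ++ "_v4 > 0.0, \"type2_l1_undef_check_" ++ candidate_id ++ "\");"
    let l2_line := "  assert(false, \"type2_l2_sim_fail_" ++ candidate_id ++ "\");"
    -- lines[:i+1] / lines[i+1:] with 0 ≤ i+1: exactly take/drop
    PySem.Str.join "\n" (lines.take (i + 1) ++ [l1_line, l2_line] ++ lines.drop (i + 1)) ++ "\n"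

-- ===== PRECONDITION & SPEC =====
-- Pre_ excludes exactly the inputs with no line stripping to "equation", where A raises ValueError.
def Pre_inject_mutations_py (source_text : String) (candidate_id : String) : Prop :=
  ((PySem.Str.splitlines source_text).any (fun l => PySem.Str.strip l == "equation")) = true
instance (source_text : String) (candidate_id : String) : Decidable (Pre_inject_mutations_py source_text candidate_id) := by unfold Pre_inject_mutations_py; infer_instance

def pvWitness_inject_mutations_py : String × String := ("model m\nequation\n  x = 1;\n", "type2_2turn_ab_c")

def Spec_inject_mutations_py (source_text : String) (candidate_id : String) (out : String) : Prop := out = inject_mutations_py_alt source_text candidate_id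
instance (source_text : String) (candidate_id : String) (out : String) : Decidable (Spec_inject_mutations_py source_text candidate_id out) := by unfold Spec_inject_mutations_py; infer_instance

-- ===== CLAIM (what is proved, stated in full; the proofs are below) =====
def Claim_equal_inject_mutations_py : Prop := ∀ (source_text : String) (candidate_id : String), Dom_inject_mutations_py source_text candidate_id → Pre_inject_mutations_py source_text candidate_id → Spec_inject_mutations_py source_text candidate_id (inject_mutations_py source_text candidate_id)

-- ===== LEMMAS AND PROOFS =====

lemma foldA_true (l1 l2 : String) : ∀ (lines : List String) (acc : List String),
    lines.foldl (fun (acc : List String × Bool) line =>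
      let nl := acc.1 ++ [line]
      if !acc.2 && (PySem.Str.strip line == "equation") then (nl ++ [l1, l2], true)
      else (nl, acc.2)) (acc, true)
    = (acc ++ lines, true) := by
  intro lines
  induction lines with
  | nil => intro acc; simp
  | cons l ls ih => intro acc; simpa using ih (acc ++ [l])

lemma pyB_locate_shift : ∀ (ls : List String) (i : Nat),
    pyB_locate ls (i + 1) = (pyB_locate ls i).map (· + 1) := by
  intro ls
  induction ls with
  | nil => intro i; simp [pyB_locate]
  | cons l ls ih =>
    intro i
    by_cases h : PySem.Str.strip l == "equation" <;> simp [pyB_locate, h, ih]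

lemma pyB_locate_isSome : ∀ (ls : List String) (i : Nat),
    (pyB_locate ls i).isSome = ls.any (fun l => PySem.Str.strip l == "equation") := by
  intro ls
  induction ls with
  | nil => intro i; simp [pyB_locate]
  | cons l ls ih =>
    intro i
    by_cases h : PySem.Str.strip l == "equation" <;> simp [pyB_locate, h, ih]

lemma l1_eq (s cid : String) :
    "  assert(" ++ ("gateforge_undef_" ++ s ++ "_v4") ++ " > 0.0, \"type2_l1_undef_check_" ++ cid ++ "\");"
    = "  assert(gateforge_undef_" ++ s ++ "_v4 > 0.0, \"type2_l1_undef_check_" ++ cid ++ "\");" := by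
  rw [show ("  assert(gateforge_undef_" : String) = "  assert(" ++ "gateforge_undef_" from rfl,
      show ("_v4 > 0.0, \"type2_l1_undef_check_" : String) = "_v4" ++ " > 0.0, \"type2_l1_undef_check_" from rfl]
  simp only [String.append_assoc]

lemma foldA_false (l1 l2 : String) : ∀ (lines : List String) (acc : List String),
    lines.foldl (fun (acc : List String × Bool) line =>
      let nl := acc.1 ++ [line]
      if !acc.2 && (PySem.Str.strip line == "equation") then (nl ++ [l1, l2], true)
      else (nl, acc.2)) (acc, false)
    = match pyB_locate lines 0 with
      | some i => (acc ++ lines.take (i + 1) ++ [l1, l2] ++ lines.drop (i + 1), true)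
      | none => (acc ++ lines, false) := by
  intro lines
  induction lines with
  | nil => intro acc; simp [pyB_locate]
  | cons l ls ih =>
    intro acc
    by_cases h : PySem.Str.strip l = "equation"
    · simp [pyB_locate, h, List.append_assoc]
      simpa [List.append_assoc] using foldA_true l1 l2 ls (acc ++ [l, l1, l2])
    · have hshift := pyB_locate_shift ls 0
      rcases hloc : pyB_locate ls 0 with _ | i
      · simp [pyB_locate, h, hshift, hloc]
        simpa [hloc] using ih (acc ++ [l])
      · simpa [pyB_locate, h, hshift, hloc, List.append_assoc] using ih (acc ++ [l])

-- ===== VERDICT (by name: the statement is the Claim_ definition above) =====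
theorem inject_mutations_py_spec : Claim_equal_inject_mutations_py := by
  intro source_text candidate_id _hdom hpre
  unfold Pre_inject_mutations_py at hpre
  unfold Spec_inject_mutations_py inject_mutations_py inject_mutations_py_alt
  have hsome : (pyB_locate (PySem.Str.splitlines source_text) 0).isSome = true := by
    rw [pyB_locate_isSome]; exact hpre
  rcases hloc : pyB_locate (PySem.Str.splitlines source_text) 0 with _ | i
  · rw [hloc] at hsome; simp at hsome
  · simp only [foldA_false, hloc]
    simp [pyA_l1_assert, pyA_l1_var, pyA_l2_assert]
    rw [l1_eq]
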